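-- pv_equiv track=rewrite | github.com/Nightdavisao/pyrldev | kprl/gan.py | _get_default_attrs
-- ===== SOURCE A (Python) =====
-- def _get_default_attrs(frames: list[dict[str, int]]) -> dict[str, int]:
--     """Return attrs that are constant across all frames."""
--     if not frames:
--         raise ValueError("empty frame list")
--     defaults = dict(frames[0])
--     for frame in frames[1:]:
--         for key in list(defaults):
--             if defaults.get(key) != frame.get(key):
--                 del defaults[key]
--     return defaults
-- ===== SOURCE B (Python) =====
-- def _get_default_attrs(frames: list[dict[str, int]]) -> dict[str, int]:
--     """Return attrs that are constant across all frames."""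
--     if not frames:
--         raise ValueError("empty frame list")
--     counts = {}
--     for f in frames:
--         for item in f.items():
--             counts[item] = counts.get(item, 0) + 1
--     n = len(frames)
--     return {k: v for k, v in frames[0].items() if counts[(k, v)] == n}
-- ===== Notes on version B (the rewrite author's own statement) =====
-- stated objective: alternative
-- what changed: Instead of A's mutable candidate dict pruned frame-by-frame with per-key dict lookups and deletions, B tallies every (key, value) pair of every frame into a counter in one pass and then keeps a pair of frames[0] iff its tally equals the number of frames; membership verification by counting replaces A's scan-and-delete.
import Mathlib
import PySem

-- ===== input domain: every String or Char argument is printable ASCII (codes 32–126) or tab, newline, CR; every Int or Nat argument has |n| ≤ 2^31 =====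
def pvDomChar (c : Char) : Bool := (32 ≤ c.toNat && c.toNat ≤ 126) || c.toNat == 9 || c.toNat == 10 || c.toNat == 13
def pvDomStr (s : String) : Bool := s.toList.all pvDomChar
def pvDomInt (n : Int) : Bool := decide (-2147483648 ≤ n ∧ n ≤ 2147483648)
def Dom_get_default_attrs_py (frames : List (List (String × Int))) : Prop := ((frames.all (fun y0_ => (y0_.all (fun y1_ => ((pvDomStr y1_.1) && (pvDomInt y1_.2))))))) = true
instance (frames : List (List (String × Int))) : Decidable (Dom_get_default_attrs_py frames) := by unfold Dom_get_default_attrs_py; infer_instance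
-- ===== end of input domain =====

-- B replaces A's mutable defaults-dict pruned frame-by-frame by a one-pass counter of all
-- (key,value) pairs, keeping a pair of frames[0] iff its tally equals the number of frames.


-- ===== PORT A =====
-- Literal port of A: defaults = dict(frames[0]); for each later frame delete the keys
-- (snapshot list(defaults)) whose value differs from frame.get(key); return defaults.
def get_default_attrs_py (frames : List (List (String × Int))) : List (String × Int) :=
  match frames with
  | [] => []  -- Python raises ValueError("empty frame list") here; excluded by Pre_
  | f0 :: rest =>
    (rest.foldl
      (fun defaults frame =>
        defaults.keys.foldl
          (fun d key =>
            if d.get? key ≠ (PySem.Dict.ofList frame).get? key then d.erase key else d)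
          defaults)
      (PySem.Dict.ofList f0)).items

-- ===== PORT B =====
-- Literal port of Source B: counts[(k,v)] tallied over all frames' items, then keep the pairs
-- of frames[0] whose tally equals len(frames).
def get_default_attrs_py_alt (frames : List (List (String × Int))) : List (String × Int) :=
  match frames with
  | [] => []  -- Python raises ValueError("empty frame list") here; excluded by Pre_
  | f0 :: rest =>
    let counts := (f0 :: rest).foldl
      (fun d f => (PySem.Dict.ofList f).items.foldl
        (fun d it => d.insert it (d.getD it 0 + 1)) d)
      PySem.Dict.empty
    (PySem.Dict.ofList f0).items.filter
      (fun kv => counts.getD kv 0 == ((f0 :: rest).length : Int))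

-- ===== PRECONDITION & SPEC =====
-- A (and B) raise ValueError on an empty frame list; only that input is excluded.
def Pre_get_default_attrs_py (frames : List (List (String × Int))) : Prop := frames ≠ []
instance (frames : List (List (String × Int))) : Decidable (Pre_get_default_attrs_py frames) := by unfold Pre_get_default_attrs_py; infer_instance
def pvWitness_get_default_attrs_py : (List (List (String × Int))) := [[("a", 1), ("b", 2)], [("a", 1)]]

def Spec_get_default_attrs_py (frames : List (List (String × Int))) (out : List (String × Int)) : Prop := out = get_default_attrs_py_alt frames
instance (frames : List (List (String × Int))) (out : List (String × Int)) : Decidable (Spec_get_default_attrs_py frames out) := by unfold Spec_get_default_attrs_py; infer_instance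

-- ===== CLAIM (what is proved, stated in full; the proofs are below) =====
def Claim_equal_get_default_attrs_py : Prop := ∀ (frames : List (List (String × Int))), Dom_get_default_attrs_py frames → Pre_get_default_attrs_py frames → Spec_get_default_attrs_py frames (get_default_attrs_py frames)

-- ===== LEMMAS AND PROOFS =====

-- A's inner deletion loop commutes with a head entry whose key the loop never visits.
lemma foldl_step_cons (g : String → Option Int) (ks : List String) (k : String) (v : Int)
    (l : List (String × Int)) (hk : k ∉ ks) :
    ks.foldl (fun d key => if d.get? key ≠ g key then d.erase key else d)
      (PySem.Dict.mk ((k, v) :: l))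
    = PySem.Dict.mk ((k, v) ::
        (ks.foldl (fun d key => if d.get? key ≠ g key then d.erase key else d)
          (PySem.Dict.mk l)).items) := by
  induction ks generalizing l with
  | nil => rfl
  | cons a ks ih =>
    have hka : (k == a) = false := by
      simp only [beq_eq_false_iff_ne]; exact fun h => hk (h ▸ List.mem_cons_self ..)
    have hk' : k ∉ ks := fun h => hk (List.mem_cons_of_mem _ h)
    simp only [List.foldl_cons]
    have hget : (PySem.Dict.mk ((k, v) :: l)).get? a = (PySem.Dict.mk l).get? a := by
      simp [PySem.Dict.get?, List.find?, hka]
    have herase : (PySem.Dict.mk ((k, v) :: l)).erase a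
        = PySem.Dict.mk ((k, v) :: ((PySem.Dict.mk l).erase a).items) := by
      simp [PySem.Dict.erase, List.filter, hka]
    rw [hget]
    by_cases hc : (PySem.Dict.mk l).get? a ≠ g a
    · rw [if_pos hc, if_pos hc, herase, ih _ hk']
    · rw [if_neg hc, if_neg hc, ih _ hk']

-- A's inner loop over the snapshot of defaults' keys is a filter when keys are unique.
lemma inner_filter (g : String → Option Int) (l : List (String × Int))
    (h : (l.map Prod.fst).Nodup) :
    (l.map Prod.fst).foldl (fun d key => if d.get? key ≠ g key then d.erase key else d)
      (PySem.Dict.mk l)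
    = PySem.Dict.mk (l.filter (fun kv => g kv.1 == some kv.2)) := by
  induction l with
  | nil => rfl
  | cons p l ih =>
    obtain ⟨k, v⟩ := p
    simp only [List.map_cons, List.nodup_cons, List.mem_map] at h
    have hk : k ∉ l.map Prod.fst := by
      intro hm; exact h.1 (by simpa using hm)
    simp only [List.map_cons, List.foldl_cons, List.filter_cons]
    have hget : (PySem.Dict.mk ((k, v) :: l)).get? k = some v := by
      simp [PySem.Dict.get?, List.find?]
    rw [hget]
    by_cases hc : g k = some v
    · rw [if_neg (by simp [hc]), foldl_step_cons g _ k v l hk, ih h.2]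
      simp [hc]
    · rw [if_pos (by simp; exact fun hh => hc hh.symm)]
      have herase : (PySem.Dict.mk ((k, v) :: l)).erase k = PySem.Dict.mk l := by
        simp only [PySem.Dict.erase, List.filter, beq_self_eq_true, Bool.not_true]
        congr 1
        apply List.filter_eq_self.mpr
        intro a ha
        have hne : a.1 ≠ k := fun he => hk (he ▸ List.mem_map_of_mem ha)
        simp [hne]
      rw [herase, ih h.2]
      have : (g k == some v) = false := by simpa using hc
      simp [this]

-- filtering preserves uniqueness of the key column
lemma nodup_filter_keys (l : List (String × Int)) (p : (String × Int) → Bool)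
    (h : (l.map Prod.fst).Nodup) : ((l.filter p).map Prod.fst).Nodup :=
  h.sublist (List.Sublist.map Prod.fst List.filter_sublist)

-- A's whole loop nest, on an items list with unique keys, is a fold of filters.
lemma outer_filter (rest : List (List (String × Int))) (l : List (String × Int))
    (h : (l.map Prod.fst).Nodup) :
    rest.foldl
      (fun defaults frame =>
        defaults.keys.foldl
          (fun d key =>
            if d.get? key ≠ (PySem.Dict.ofList frame).get? key then d.erase key else d)
          defaults)
      (PySem.Dict.mk l)
    = PySem.Dict.mk (rest.foldl
        (fun l frame => l.filter (fun kv => (PySem.Dict.ofList frame).get? kv.1 == some kv.2))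
        l) := by
  induction rest generalizing l with
  | nil => rfl
  | cons f rest ih =>
    simp only [List.foldl_cons]
    have hkeys : (PySem.Dict.mk l).keys = l.map Prod.fst := rfl
    rw [hkeys, inner_filter _ l h]
    exact ih _ (nodup_filter_keys l _ h)

-- a fold of filters is one filter with an `all` predicate
lemma foldl_filter_all (fs : List (List (String × Int))) (l : List (String × Int)) :
    fs.foldl
      (fun l f => l.filter (fun kv => (PySem.Dict.ofList f).get? kv.1 == some kv.2)) l
    = l.filter (fun kv => fs.all (fun f => (PySem.Dict.ofList f).get? kv.1 == some kv.2)) := by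
  induction fs generalizing l with
  | nil => simp
  | cons f fs ih =>
    simp only [List.foldl_cons, List.all_cons]
    rw [ih, List.filter_filter]
    congr 1
    funext kv
    exact Bool.and_comm _ _

-- B's counting pass: the tally of kv equals the number of occurrences of kv in all items lists.
lemma getD_counts (fs : List (List (String × Int))) (d : PySem.Dict (String × Int) Int)
    (kv : String × Int) :
    (fs.foldl
        (fun d f => (PySem.Dict.ofList f).items.foldl
          (fun d it => d.insert it (d.getD it 0 + 1)) d) d).getD kv 0
    = d.getD kv 0 + ((fs.map (fun f => (PySem.Dict.ofList f).items)).flatten.count kv : Int) := by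
  induction fs generalizing d with
  | nil => simp
  | cons f fs ih =>
    simp only [List.foldl_cons, List.map_cons, List.flatten_cons, List.count_append]
    rw [ih, PySem.Dict.getD_foldl_insert_add_one]
    push_cast
    ring

-- in one frame's items list the count of a pair is 1 or 0 according to get?
lemma count_items (f : List (String × Int)) (kv : String × Int) :
    ((PySem.Dict.ofList f).items.count kv : Nat)
    = if (PySem.Dict.ofList f).get? kv.1 = some kv.2 then 1 else 0 := by
  have hnd : ((PySem.Dict.ofList f).items.map Prod.fst).Nodup := PySem.Dict.nodup_keys_ofList f
  have hnd' : (PySem.Dict.ofList f).items.Nodup := hnd.of_map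
  obtain ⟨k, v⟩ := kv
  by_cases h : (PySem.Dict.ofList f).get? k = some v
  · rw [if_pos h]
    exact List.count_eq_one_of_mem hnd' (PySem.Dict.mem_items_of_get?_eq_some _ h)
  · rw [if_neg h]
    apply List.count_eq_zero_of_not_mem
    intro hm
    exact h (PySem.Dict.get?_of_mem_items _ hm hnd)

-- total tally = number of frames whose dict maps kv.1 to kv.2
lemma count_flatten (fs : List (List (String × Int))) (kv : String × Int) :
    (fs.map (fun f => (PySem.Dict.ofList f).items)).flatten.count kv
    = fs.countP (fun f => (PySem.Dict.ofList f).get? kv.1 == some kv.2) := by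
  induction fs with
  | nil => rfl
  | cons f fs ih =>
    simp only [List.map_cons, List.flatten_cons, List.count_append, List.countP_cons, ih]
    rw [count_items]
    by_cases h : (PySem.Dict.ofList f).get? kv.1 = some kv.2
    · simp [h, Nat.add_comm]
    · simp [h]

-- ===== VERDICT (by name: the statement is the Claim_ definition above) =====
theorem get_default_attrs_py_spec : Claim_equal_get_default_attrs_py := by
  intro frames _ hpre
  match frames with
  | [] => exact absurd rfl hpre
  | f0 :: rest =>
    show get_default_attrs_py (f0 :: rest) = get_default_attrs_py_alt (f0 :: rest)
    have hnd : ((PySem.Dict.ofList f0).items.map Prod.fst).Nodup :=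
      PySem.Dict.nodup_keys_ofList f0
    have heta : PySem.Dict.ofList f0 = PySem.Dict.mk (PySem.Dict.ofList f0).items := rfl
    simp only [get_default_attrs_py, get_default_attrs_py_alt]
    rw [heta, outer_filter rest _ hnd, foldl_filter_all]
    show PySem.Dict.items _ = _
    apply List.filter_congr
    intro kv hkv
    have hf0 : (PySem.Dict.ofList f0).get? kv.1 = some kv.2 :=
      by obtain ⟨k, v⟩ := kv; exact PySem.Dict.get?_of_mem_items _ hkv hnd
    rw [getD_counts, count_flatten]
    simp only [PySem.Dict.getD_empty, zero_add]
    set p := fun f => (PySem.Dict.ofList f).get? kv.1 == some kv.2 with hp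
    have hiff : ((f0 :: rest).countP p = (f0 :: rest).length) ↔ (rest.all p = true) := by
      rw [List.countP_eq_length]
      constructor
      · intro h
        rw [List.all_eq_true]
        intro f hf
        exact h f (List.mem_cons_of_mem _ hf)
      · intro h f hf
        rcases List.mem_cons.mp hf with h0 | hr
        · subst h0; simpa [hp] using hf0
        · exact (List.all_eq_true.mp h) f hr
    rcases Bool.eq_false_or_eq_true (rest.all p) with hb | hb
    · have h1 := hiff.mpr hb
      have h2 : (((f0 :: rest).countP p : Int)) = (((f0 :: rest).length : Int)) := by
        exact_mod_cast h1
      rw [hb]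
      exact (beq_iff_eq.mpr h2).symm
    · have h1 : (f0 :: rest).countP p ≠ (f0 :: rest).length := fun h => by
        rw [hiff.mp h] at hb; cases hb
      have h2 : (((f0 :: rest).countP p : Int)) ≠ (((f0 :: rest).length : Int)) := by
        exact_mod_cast h1
      rw [hb]
      exact (beq_eq_false_iff_ne.mpr h2).symm
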